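-- pv_equiv track=rewrite | github.com/alasdairnicol/advent-of-code-2025 | day05.py | in_range
-- ===== SOURCE A (Python) =====
-- def in_range(ranges, ingredient):
--     for lower, upper in ranges:
--         if lower > ingredient:
--             return False
--
--         if upper < ingredient:
--             continue
--
--         return True
--
--     return False
-- ===== SOURCE B (Python) =====
-- def in_range(ranges, ingredient):
--     # Stage 1: the only ranges A ever considers are the leading ones whose
--     # lower bound admits the ingredient (the scan aborts at the first
--     # lower > ingredient).  Stage 2: the answer is whether any of those
--     # candidate ranges reaches up to the ingredient.
--     candidates = []
--     for lower, upper in ranges: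
--         if lower > ingredient:
--             break
--         candidates.append(upper)
--     return any(upper >= ingredient for upper in candidates)
-- ===== Notes on version B (the rewrite author's own statement) =====
-- stated objective: alternative
-- what changed: Replaces A's single scan with three interleaved early-exit branches by two staged passes: first collect the leading prefix of ranges whose lower bound admits the ingredient (takeWhile), then test with any() whether some collected upper bound reaches the ingredient.
import Mathlib
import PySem

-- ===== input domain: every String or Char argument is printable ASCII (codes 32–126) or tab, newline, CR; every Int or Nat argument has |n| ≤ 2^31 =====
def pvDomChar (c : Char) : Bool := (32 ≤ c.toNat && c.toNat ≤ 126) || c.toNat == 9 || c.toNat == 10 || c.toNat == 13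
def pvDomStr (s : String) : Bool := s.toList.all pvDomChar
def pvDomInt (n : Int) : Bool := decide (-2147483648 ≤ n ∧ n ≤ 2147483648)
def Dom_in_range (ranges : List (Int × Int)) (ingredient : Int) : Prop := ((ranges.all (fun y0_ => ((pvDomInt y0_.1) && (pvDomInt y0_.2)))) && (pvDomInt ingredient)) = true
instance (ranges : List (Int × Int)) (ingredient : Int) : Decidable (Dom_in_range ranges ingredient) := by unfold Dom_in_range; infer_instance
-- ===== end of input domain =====

-- B restates A's three-branch early-exit scan as two staged passes: takeWhile on the lower bounds, then an any over the collected upper bounds (same cost).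
-- ===== PORT A =====
def in_range (ranges : List (Int × Int)) (ingredient : Int) : Bool :=
  match ranges with
  | [] => false
  | (lower, upper) :: rest =>
    if lower > ingredient then false
    else if upper < ingredient then in_range rest ingredient
    else true

-- ===== PORT B =====
def in_range_alt (ranges : List (Int × Int)) (ingredient : Int) : Bool :=
  ((ranges.takeWhile (fun p => p.1 ≤ ingredient)).map (fun p => p.2)).any
    (fun upper => upper ≥ ingredient)

-- ===== PRECONDITION & SPEC =====
def Spec_in_range (ranges : List (Int × Int)) (ingredient : Int) (out : Bool) : Prop := out = in_range_alt ranges ingredient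
instance (ranges : List (Int × Int)) (ingredient : Int) (out : Bool) : Decidable (Spec_in_range ranges ingredient out) := by unfold Spec_in_range; infer_instance

-- ===== CLAIM (what is proved, stated in full; the proofs are below) =====
def Claim_equal_in_range : Prop := ∀ (ranges : List (Int × Int)) (ingredient : Int), Dom_in_range ranges ingredient → Spec_in_range ranges ingredient (in_range ranges ingredient)

-- ===== LEMMAS AND PROOFS =====
theorem in_range_eq_alt (ingredient : Int) (ranges : List (Int × Int)) :
    in_range ranges ingredient = in_range_alt ranges ingredient := by
  induction ranges with
  | nil => rfl
  | cons p rest ih =>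
    obtain ⟨l, u⟩ := p
    by_cases hl : l > ingredient
    · have h2 : ¬ l ≤ ingredient := by omega
      simp [in_range, in_range_alt, List.takeWhile, hl, h2]
    · have h1 : l ≤ ingredient := by omega
      by_cases hu : u < ingredient
      · have h2 : ¬ u ≥ ingredient := by omega
        simp only [in_range, in_range_alt, List.takeWhile] at ih ⊢
        simp [hl, hu, h1, h2, ih]
      · have h2 : u ≥ ingredient := by omega
        simp [in_range, in_range_alt, List.takeWhile, hl, hu, h1, h2]

-- ===== VERDICT (by name: the statement is the Claim_ definition above) =====
theorem in_range_spec : Claim_equal_in_range := by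
  intro ranges ingredient _
  exact (in_range_eq_alt ingredient ranges).symm ▸ rfl
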